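-- pv_equiv track=rewrite | github.com/pshs-mc-reboot/compprog | CF1084C/solution.py | solve
-- ===== SOURCE A (Python) =====
-- mod = int(1e9 + 7)
--
-- a = 'a'
--
-- b = 'b'
--
-- def solve(s):
--     result = 1
--     count = 1
--
--     for c in s:
--         if c == a:
--             count += 1
--         elif c == b:
--             result = (result * count) % mod
--             count = 1
--
--     result = (result * count) % mod
--
--     return (result - 1) % mod
-- ===== SOURCE B (Python) =====
-- def solve(s):
--     mod = 1000000007
--     result = 1
--     for part in s.split('b'):
--         result = (result * (part.count('a') + 1)) % mod
--     return (result - 1) % mod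
-- ===== Notes on version B (the rewrite author's own statement) =====
-- stated objective: simpler
-- what changed: Replaces the fused per-character state machine (running result + running count) with a split-into-groups pass followed by a per-group product of (group's letter-a count + 1).
import Mathlib
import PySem

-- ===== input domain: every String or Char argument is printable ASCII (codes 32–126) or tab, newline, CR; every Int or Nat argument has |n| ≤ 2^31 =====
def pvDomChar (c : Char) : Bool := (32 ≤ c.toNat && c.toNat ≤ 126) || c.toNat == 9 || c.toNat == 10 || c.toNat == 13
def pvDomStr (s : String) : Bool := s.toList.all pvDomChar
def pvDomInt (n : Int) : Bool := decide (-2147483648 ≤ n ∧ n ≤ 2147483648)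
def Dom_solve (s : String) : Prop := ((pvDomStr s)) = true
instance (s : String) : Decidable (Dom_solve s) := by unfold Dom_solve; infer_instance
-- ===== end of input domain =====

-- B replaces A's fused per-character state machine with split-on-'b' followed by a per-group product of (count('a')+1) (objective: simpler).

-- ===== PORT A =====
-- literal transliteration of A's single scan with (result, count) state
def solve (s : String) : Int :=
  let m : Int := 1000000007
  let st := s.toList.foldl
    (fun (rc : Int × Int) c =>
      if c = 'a' then (rc.1, rc.2 + 1)
      else if c = 'b' then (PySem.Int.mod (rc.1 * rc.2) m, 1)
      else rc) ((1 : Int), (1 : Int))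
  let result := PySem.Int.mod (st.1 * st.2) m
  PySem.Int.mod (result - 1) m

-- ===== PORT B =====
-- literal transliteration of Source B: s.split('b') (PySem.Chars.splitOn on the code points),
-- then a fold multiplying in (part.count('a') + 1) mod m
def solve_alt (s : String) : Int :=
  let m : Int := 1000000007
  let result := (PySem.Chars.splitOn s.toList ['b']).foldl
    (fun r part => PySem.Int.mod (r * ((PySem.Chars.count part ['a'] : Int) + 1)) m) (1 : Int)
  PySem.Int.mod (result - 1) m

-- ===== PRECONDITION & SPEC =====
def Spec_solve (s : String) (out : Int) : Prop := out = solve_alt s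
instance (s : String) (out : Int) : Decidable (Spec_solve s out) := by unfold Spec_solve; infer_instance

-- ===== CLAIM (what is proved, stated in full; the proofs are below) =====
def Claim_equal_solve : Prop := ∀ (s : String), Dom_solve s → Spec_solve s (solve s)

-- ===== LEMMAS AND PROOFS =====

theorem pv_count_go_char (c : Char) :
    ∀ (l : List Char) (fuel acc : Nat), l.length ≤ fuel →
      PySem.Chars.count.go [c] fuel l acc = acc + l.count c := by
  intro l
  induction l with
  | nil => intro fuel acc _; cases fuel <;> simp [PySem.Chars.count.go]
  | cons h t ih =>
    intro fuel acc hle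
    cases fuel with
    | zero => simp at hle
    | succ n =>
      have hle' : t.length ≤ n := by simpa using hle
      rw [PySem.Chars.count.go]
      by_cases hch : (c == h) = true
      · rw [if_pos (by simp [List.isPrefixOf, hch]), List.length_singleton, List.drop_one,
          List.tail_cons, ih n (acc + 1) hle', List.count_cons]
        have hhc : (h == c) = true := by simpa [BEq.comm] using hch
        simp [hhc]; omega
      · rw [if_neg (by simp [List.isPrefixOf]; simpa using hch), ih n acc hle', List.count_cons]
        have hhc : (h == c) = false := by
          rw [BEq.comm]; exact Bool.not_eq_true _ ▸ (by simpa using hch)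
        simp [hhc]

theorem pv_splitOn_go_char (b : Char) :
    ∀ (l : List Char) (fuel : Nat) (cur : List Char) (acc : List (List Char)),
      l.length < fuel →
      PySem.Chars.splitOn.go [b] fuel l cur acc =
        acc.reverse ++ (List.splitOnP (· == b) l).modifyHead (cur.reverse ++ ·) := by
  intro l
  induction l with
  | nil =>
    intro fuel cur acc h
    cases fuel with
    | zero => omega
    | succ n => simp [PySem.Chars.splitOn.go, List.splitOnP_nil]
  | cons c t ih =>
    intro fuel cur acc h
    cases fuel with
    | zero => omega
    | succ n =>
      have h' : t.length < n := by simpa using h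
      rw [PySem.Chars.splitOn.go]
      by_cases hbc : (b == c) = true
      · rw [if_pos (by simp [List.isPrefixOf, hbc]), List.length_singleton, List.drop_one,
          List.tail_cons, ih n [] (cur.reverse :: acc) h']
        have hp : ((c == b) = true) := by simpa [BEq.comm] using hbc
        rw [List.splitOnP_cons, if_pos hp]
        obtain ⟨h0, t0, ht0⟩ := List.exists_cons_of_ne_nil (List.splitOnP_ne_nil (· == b) t)
        simp [ht0]
      · rw [if_neg (by simp [List.isPrefixOf]; simpa using hbc), ih n (c :: cur) acc h']
        have hp : ((c == b) = false) := by
          rw [BEq.comm]; exact Bool.not_eq_true _ ▸ (by simpa using hbc)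
        rw [List.splitOnP_cons, if_neg (by simp [hp])]
        obtain ⟨h0, t0, ht0⟩ := List.exists_cons_of_ne_nil (List.splitOnP_ne_nil (· == b) t)
        simp [ht0]

theorem pv_count_char (l : List Char) (c : Char) :
    PySem.Chars.count l [c] = l.count c := by
  rw [PySem.Chars.count, if_neg (by simp)]
  simpa using pv_count_go_char c l l.length 0 le_rfl

theorem pv_splitOn_char (l : List Char) (b : Char) :
    PySem.Chars.splitOn l [b] = List.splitOnP (· == b) l := by
  rw [PySem.Chars.splitOn, pv_splitOn_go_char b l (l.length + 1) [] [] (by omega)]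
  obtain ⟨h0, t0, ht0⟩ := List.exists_cons_of_ne_nil (List.splitOnP_ne_nil (· == b) l)
  simp [ht0]

theorem pv_loop_eq (m : Int) :
    ∀ (cs : List Char) (r k : Int),
      PySem.Int.mod ((cs.foldl
        (fun (rc : Int × Int) c =>
          if c = 'a' then (rc.1, rc.2 + 1)
          else if c = 'b' then (PySem.Int.mod (rc.1 * rc.2) m, 1)
          else rc) (r, k)).1 * (cs.foldl
        (fun (rc : Int × Int) c =>
          if c = 'a' then (rc.1, rc.2 + 1)
          else if c = 'b' then (PySem.Int.mod (rc.1 * rc.2) m, 1)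
          else rc) (r, k)).2) m
      = ((List.splitOnP (· == 'b') cs).tail).foldl
          (fun r part => PySem.Int.mod (r * ((part.count 'a' : Int) + 1)) m)
          (PySem.Int.mod (r * (k + ((List.splitOnP (· == 'b') cs).headI.count 'a' : Int))) m) := by
  intro cs
  induction cs with
  | nil => intro r k; simp [List.splitOnP_nil]
  | cons c t ih =>
    intro r k
    obtain ⟨h0, t0, ht0⟩ := List.exists_cons_of_ne_nil (List.splitOnP_ne_nil (· == 'b') t)
    by_cases ha : c = 'a'
    · subst ha
      have hab : (('a':Char) == 'b') = false := by decide
      simp only [List.foldl_cons, List.splitOnP_cons, reduceIte, hab, Bool.false_eq_true,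
        if_false, ht0, List.modifyHead_cons, List.tail_cons, List.headI]
      have h2 := ih r (k + 1)
      simp only [ht0, List.tail_cons, List.headI] at h2
      rw [h2]
      have h3 : ((('a' :: h0).count 'a' : Int)) = (h0.count 'a' : Int) + 1 := by
        simp [List.count_cons]
      rw [h3]; ring_nf
    · by_cases hb : c = 'b'
      · subst hb
        have hbb : (('b':Char) == 'b') = true := by decide
        simp only [List.foldl_cons, if_neg ha, List.splitOnP_cons, reduceIte, hbb, if_true,
          ht0, List.tail_cons, List.headI]
        have h2 := ih (PySem.Int.mod (r * k) m) 1
        simp only [ht0, List.tail_cons, List.headI] at h2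
        simp only [List.headI, List.count_nil, Nat.cast_zero, add_zero]
        rw [h2]
        ring_nf
      · have hp : ((c == 'b') = false) := by simpa using hb
        simp only [List.foldl_cons, if_neg ha, if_neg hb, List.splitOnP_cons, hp,
          Bool.false_eq_true, if_false, ht0, List.modifyHead_cons, List.tail_cons, List.headI]
        have h2 := ih r k
        simp only [ht0, List.tail_cons, List.headI] at h2
        rw [h2]
        have h3 : (((c :: h0).count 'a' : Int)) = (h0.count 'a' : Int) := by
          have : (c == 'a') = false := by simpa using ha
          simp [List.count_cons, this]
        rw [h3]

-- ===== VERDICT (by name: the statement is the Claim_ definition above) =====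
theorem solve_spec : Claim_equal_solve := by
  intro s _
  unfold Spec_solve solve solve_alt
  simp only [pv_splitOn_char, pv_count_char]
  obtain ⟨h0, t0, ht0⟩ := List.exists_cons_of_ne_nil (List.splitOnP_ne_nil (· == 'b') s.toList)
  have h2 := pv_loop_eq 1000000007 s.toList 1 1
  simp only [ht0, List.tail_cons, List.headI] at h2 ⊢
  rw [h2, List.foldl_cons]
  ring_nf
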